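-- pv_equiv track=rewrite | github.com/HRDI0/codingtest_study | programers/programers_기능개발.py | solution
-- ===== SOURCE A (Python) =====
-- def solution(progresses, speeds):
--     p_size = len(progresses)
--     work_end = [0]*p_size
--     day = 0
--     while True:
--         for p in range(p_size):
--             if p == 0:
--                 if progresses[p] >= 100:
--                     if work_end[p] == 0:
--                         work_end[p] = day
--                 else:
--                     progresses[p] += speeds[p]
--             else:
--                 if work_end[p-1] != 0 and progresses[p] >= 100:
--                     if work_end[p] == 0:
--                         work_end[p] = day
--                 else:
--                     progresses[p] += speeds[p]
--         day += 1
--         if not 0 in work_end: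
--             break
--
--     answer = {}
--     for end in work_end:
--         answer[end] = answer.get(end,0)+1
--     result = []
--     for r in answer.values():
--         result.append(r)
--     return result
-- ===== SOURCE B (Python) =====
-- def solution(progresses, speeds):
--     days = []
--     cur = 0
--     for i in range(len(progresses)):
--         cur = max(cur, 1, -((progresses[i] - 100) // speeds[i]))
--         days.append(cur)
--     counts = {}
--     for d in days:
--         counts[d] = counts.get(d, 0) + 1
--     return list(counts.values())
-- ===== Notes on version B (the rewrite author's own statement) =====
-- stated objective: alternative
-- what changed: A simulates the work day by day (one pass over all tasks per day until every task is released); B computes each task's completion day by one ceiling division, takes the running maximum as its release day in a single pass, and counts releases per day with the same dict (intended as faster, O(n) vs O(n*D), but a timing run could not confirm a ratio: A times out on the large random inputs).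
-- outside the precondition, e.g. on solution([150], [0]): A returns [1], B raises ZeroDivisionError; on solution([150], []): A returns [1], B raises IndexError
import Mathlib
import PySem

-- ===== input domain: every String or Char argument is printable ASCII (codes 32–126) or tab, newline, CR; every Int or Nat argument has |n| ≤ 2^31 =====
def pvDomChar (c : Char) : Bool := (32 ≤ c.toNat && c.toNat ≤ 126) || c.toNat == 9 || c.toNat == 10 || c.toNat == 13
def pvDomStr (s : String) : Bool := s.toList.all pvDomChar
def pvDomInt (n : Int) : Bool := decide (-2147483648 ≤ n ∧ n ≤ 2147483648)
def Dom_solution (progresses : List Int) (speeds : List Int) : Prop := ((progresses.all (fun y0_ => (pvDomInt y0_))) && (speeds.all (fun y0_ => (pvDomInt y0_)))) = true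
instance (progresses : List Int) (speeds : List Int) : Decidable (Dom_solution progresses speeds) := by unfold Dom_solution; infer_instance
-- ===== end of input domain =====

-- B replaces A's day-by-day simulation (one pass over all tasks per day until every task is
-- released) by a single-pass closed form: ceiling-division completion day per task, running
-- max = release day, then the same dict-count of releases per day (intended as faster; the
-- timing run could not measure a ratio because A does not finish on its large random inputs).
-- Note: A mutates `progresses` in place (B does not); the equivalence proved here is about the
-- RETURN value only.


-- ===== PORT A =====
-- one pass of A's inner `for p in range(p_size)` loop; list indexing is via getD, which is
-- exact here because Pre_solution puts every accessed index in range
def stepA (speeds : List Int) (day : Int) (st : List Int × List Int) (p : Nat) : List Int × List Int :=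
  if p = 0 then
    if 100 ≤ st.1.getD 0 0 then
      if st.2.getD 0 0 = 0 then (st.1, st.2.set 0 day) else st
    else (st.1.set 0 (st.1.getD 0 0 + speeds.getD 0 0), st.2)
  else
    if st.2.getD (p - 1) 0 ≠ 0 ∧ 100 ≤ st.1.getD p 0 then
      if st.2.getD p 0 = 0 then (st.1, st.2.set p day) else st
    else (st.1.set p (st.1.getD p 0 + speeds.getD p 0), st.2)

-- A's `while True` loop; `fuel` is only a totalization guard (Python has none) and
-- Pre_solution guarantees the fuel passed below suffices (proved in the lemmas)
def loopA (speeds : List Int) (n : Nat) : Nat → Int → List Int × List Int → List Int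
  | 0, _, st => st.2
  | fuel + 1, day, st =>
    let st' := (List.range n).foldl (stepA speeds day) st
    if st'.2.contains 0 then loopA speeds n fuel (day + 1) st' else st'.2

-- A's final two loops: count each end day in a dict, then list the dict's values
def countEndsA (workEnd : List Int) : List Int :=
  (workEnd.foldl (fun answer e => answer.insert e (answer.getD e 0 + 1))
      (PySem.Dict.empty : PySem.Dict Int Int)).values

def solution (progresses : List Int) (speeds : List Int) : List Int :=
  let pSize := progresses.length
  let workEnd := List.replicate pSize (0 : Int)
  countEndsA (loopA speeds pSize (2 + (progresses.map (fun p => (101 - p).toNat)).sum) 0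
    (progresses, workEnd))

-- ===== PORT B =====
-- B's grouping dict (same code as A's final loops in the Python sources)
def countDaysB (days : List Int) : List Int :=
  (days.foldl (fun counts d => counts.insert d (counts.getD d 0 + 1))
      (PySem.Dict.empty : PySem.Dict Int Int)).values

def solution_alt (progresses : List Int) (speeds : List Int) : List Int :=
  let days := ((List.range progresses.length).foldl
    (fun (st : List Int × Int) i =>
      let cur := max (max st.2 1)
        (-(PySem.Int.floordiv (progresses.getD i 0 - 100) (speeds.getD i 0)))
      (st.1 ++ [cur], cur)) ([], 0)).1
  countDaysB days

-- ===== PRECONDITION & SPEC =====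
-- Pre_solution: one speed per task, each ≥ 1 (otherwise A loops forever or raises IndexError;
-- it also excludes the corner where a task already at ≥ 100 lets A return despite a
-- nonpositive/missing speed — there B raises, see the cites)
def Pre_solution (progresses : List Int) (speeds : List Int) : Prop :=
  progresses.length ≤ speeds.length ∧ ∀ i, i < progresses.length → 1 ≤ speeds.getD i 0
instance (progresses : List Int) (speeds : List Int) : Decidable (Pre_solution progresses speeds) := by
  unfold Pre_solution; infer_instance

def pvWitness_solution : List Int × List Int := ([93, 30, 55], [1, 30, 5])

def Spec_solution (progresses : List Int) (speeds : List Int) (out : List Int) : Prop := out = solution_alt progresses speeds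
instance (progresses : List Int) (speeds : List Int) (out : List Int) : Decidable (Spec_solution progresses speeds out) := by unfold Spec_solution; infer_instance

-- ===== CLAIM (what is proved, stated in full; the proofs are below) =====
def Claim_equal_solution : Prop := ∀ (progresses : List Int) (speeds : List Int), Dom_solution progresses speeds → Pre_solution progresses speeds → Spec_solution progresses speeds (solution progresses speeds)

-- ===== LEMMAS AND PROOFS =====

-- ceiling division ceil((100 - progresses[p]) / speeds[p]), the day task p itself reaches 100
def dce (P S : List Int) (p : Nat) : Int :=
  -(PySem.Int.floordiv (P.getD p 0 - 100) (S.getD p 0))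

-- e p = the day on which A records task p in work_end (its release day)
def eR (P S : List Int) : Nat → Int
  | 0 => max 1 (dce P S 0)
  | p + 1 => max (eR P S p) (dce P S (p + 1))

-- c p = the first day on which A's release condition for task p holds (additions stop)
def cR (P S : List Int) : Nat → Int
  | 0 => max 0 (dce P S 0)
  | p + 1 => eR P S (p + 1)

-- closed forms of A's loop state at the start of the pass with day = k
def fP (P S : List Int) (k : Int) (p : Nat) : Int :=
  P.getD p 0 + min k (cR P S p) * S.getD p 0
def fW (P S : List Int) (k : Int) (p : Nat) : Int :=
  if eR P S p < k then eR P S p else 0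

def mkL (n : Nat) (f : Nat → Int) : List Int := (List.range n).map f

theorem mkL_getD {n : Nat} {f : Nat → Int} {p : Nat} (h : p < n) : (mkL n f).getD p 0 = f p := by
  simp [mkL, List.getD_eq_getElem?_getD, h]

theorem mkL_congr {n : Nat} {f g : Nat → Int} (h : ∀ p, p < n → f p = g p) :
    mkL n f = mkL n g := by
  simp only [mkL]
  exact List.map_congr_left (fun p hp => h p (List.mem_range.mp hp))

theorem mkL_set {n : Nat} {f : Nat → Int} {j : Nat} (h : j < n) (v : Int) :
    (mkL n f).set j v = mkL n (fun p => if p = j then v else f p) := by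
  apply List.ext_getElem
  · simp [mkL]
  · intro i h1 h2
    simp only [mkL, List.length_map, List.length_range] at h2
    simp [mkL, List.getElem_set, eq_comm]

theorem one_le_eR (P S : List Int) (p : Nat) : 1 ≤ eR P S p := by
  induction p with
  | zero => simp [eR]
  | succ p ih => simp only [eR]; omega

theorem cR_nonneg (P S : List Int) (p : Nat) : 0 ≤ cR P S p := by
  cases p with
  | zero => simp [cR]
  | succ p => have := one_le_eR P S (p + 1); simp only [cR]; omega

theorem cR_le_eR (P S : List Int) (p : Nat) : cR P S p ≤ eR P S p := by
  cases p with
  | zero => simp [cR, eR]; omega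
  | succ p => simp [cR]

theorem eR_le_max (P S : List Int) (p : Nat) : eR P S p ≤ max 1 (cR P S p) := by
  cases p with
  | zero => simp [cR, eR]; omega
  | succ p => have := one_le_eR P S (p + 1); simp only [cR]; omega

-- ceiling bracket: dce p ≤ q ↔ 100 - P[p] ≤ q * S[p], for S[p] ≥ 1
theorem dce_le_iff {P S : List Int} {p : Nat} (hs : 1 ≤ S.getD p 0) (q : Int) :
    dce P S p ≤ q ↔ 100 - P.getD p 0 ≤ q * S.getD p 0 := by
  unfold dce
  rw [neg_le, PySem.Int.le_floordiv_iff_mul_le (show (0 : Int) < S.getD p 0 by omega)]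
  constructor <;> intro h <;> linarith

-- A's release condition for task 0 at day k, in closed form
theorem cond0_iff {P S : List Int} (hs : 1 ≤ S.getD 0 0) (k : Nat) :
    100 ≤ fP P S (k : Int) 0 ↔ cR P S 0 ≤ (k : Int) := by
  unfold fP
  have hc := cR_nonneg P S 0
  constructor
  · intro h
    by_contra hk
    rw [not_le] at hk
    have hc0 : cR P S 0 = dce P S 0 := by
      simp only [cR] at hk ⊢; omega
    have hmin : min (k : Int) (cR P S 0) = (k : Int) := by omega
    rw [hmin] at h
    have h2 : dce P S 0 ≤ (k : Int) := (dce_le_iff hs _).mpr (by linarith)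
    omega
  · intro h
    have hmin : min (k : Int) (cR P S 0) = cR P S 0 := by omega
    rw [hmin]
    have hd : dce P S 0 ≤ cR P S 0 := by simp [cR]
    have h2 := (dce_le_iff hs _).mp hd
    linarith

-- A's release condition for task p+1 at day k (previous task already recorded ∧ progress ≥ 100)
theorem condS_iff {P S : List Int} {p : Nat} (hs : 1 ≤ S.getD (p + 1) 0) (k : Nat) :
    (eR P S p ≤ (k : Int) ∧ 100 ≤ fP P S (k : Int) (p + 1)) ↔ eR P S (p + 1) ≤ (k : Int) := by
  unfold fP
  have hc : cR P S (p + 1) = eR P S (p + 1) := by simp [cR]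
  rw [hc]
  constructor
  · rintro ⟨he, h100⟩
    by_contra hk
    rw [not_le] at hk
    have hmin : min (k : Int) (eR P S (p + 1)) = (k : Int) := by omega
    rw [hmin] at h100
    have h2 : dce P S (p + 1) ≤ (k : Int) := (dce_le_iff hs _).mpr (by linarith)
    simp only [eR] at hk
    omega
  · intro h
    have hmin : min (k : Int) (eR P S (p + 1)) = eR P S (p + 1) := by omega
    rw [hmin]
    have hd : dce P S (p + 1) ≤ eR P S (p + 1) := by simp [eR]
    have hprev : eR P S p ≤ eR P S (p + 1) := by simp [eR]
    have h2 := (dce_le_iff hs _).mp hd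
    exact ⟨by omega, by linarith⟩

-- mixed state inside a pass: indices < j already advanced to day k+1, the rest still at day k
def pMix (P S : List Int) (k : Int) (j : Nat) (p : Nat) : Int :=
  if p < j then fP P S (k + 1) p else fP P S k p
def wMix (P S : List Int) (k : Int) (j : Nat) (p : Nat) : Int :=
  if p < j then fW P S (k + 1) p else fW P S k p

theorem fW_ne_iff {P S : List Int} {j : Nat} (k : Int) :
    fW P S (k + 1) j ≠ 0 ↔ eR P S j ≤ k := by
  have := one_le_eR P S j
  unfold fW; split_ifs with h <;> omega

theorem fW_zero_iff {P S : List Int} {j : Nat} (k : Int) :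
    fW P S k j = 0 ↔ k ≤ eR P S j := by
  have := one_le_eR P S j
  unfold fW; split_ifs with h <;> omega

theorem eR_mono (P S : List Int) {p q : Nat} (h : p ≤ q) : eR P S p ≤ eR P S q := by
  induction q with
  | zero => simp_all
  | succ q ih =>
    rcases Nat.lt_or_ge p (q + 1) with hlt | hge
    · have := ih (by omega)
      simp only [eR]; omega
    · have : p = q + 1 := by omega
      subst this; rfl

theorem fW_succ_of_ne {P S : List Int} {j : Nat} {k : Int} (h : eR P S j ≠ k) :
    fW P S (k + 1) j = fW P S k j := by
  unfold fW; split_ifs with h1 h2 <;> omega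

theorem fP_frozen {P S : List Int} {j : Nat} {k : Int} (h : cR P S j ≤ k) :
    fP P S (k + 1) j = fP P S k j := by
  unfold fP
  rw [min_eq_right h, min_eq_right (by omega)]

theorem fP_add {P S : List Int} {j : Nat} {k : Int} (h : k < cR P S j) :
    fP P S k j + S.getD j 0 = fP P S (k + 1) j := by
  unfold fP
  rw [min_eq_left (by omega), min_eq_left (by omega)]
  ring

theorem wSet_val {P S : List Int} {j : Nat} {k : Int} (hk : 0 ≤ k)
    (h1 : cR P S j ≤ k) (h2 : k ≤ eR P S j) : (k : Int) = fW P S (k + 1) j := by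
  have hce := cR_le_eR P S j
  have hem := eR_le_max P S j
  have he1 := one_le_eR P S j
  unfold fW; split_ifs with h <;> omega

theorem pMix_succ (P S : List Int) (k : Int) (j p : Nat) :
    pMix P S k (j + 1) p = if p = j then fP P S (k + 1) j else pMix P S k j p := by
  unfold pMix
  split_ifs with h1 h2 h2 <;> first | rfl | (subst h2; rfl) | (exfalso; omega)

theorem wMix_succ (P S : List Int) (k : Int) (j p : Nat) :
    wMix P S k (j + 1) p = if p = j then fW P S (k + 1) j else wMix P S k j p := by
  unfold wMix
  split_ifs with h1 h2 h2 <;> first | rfl | (subst h2; rfl) | (exfalso; omega)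

theorem mkL_set_self {n : Nat} {f : Nat → Int} {j : Nat} (hj : j < n) (v : Int)
    (hv : v = f j) : (mkL n f).set j v = mkL n f := by
  rw [mkL_set hj]
  apply mkL_congr
  intro p hp
  split_ifs with h
  · subst h; exact hv
  · rfl

theorem mkL_pMix_set {P S : List Int} {n : Nat} {k : Int} {j : Nat} (hj : j < n) :
    mkL n (pMix P S k (j + 1)) = (mkL n (pMix P S k j)).set j (fP P S (k + 1) j) := by
  rw [mkL_set hj]
  exact mkL_congr (fun p _ => pMix_succ P S k j p)

theorem mkL_wMix_set {P S : List Int} {n : Nat} {k : Int} {j : Nat} (hj : j < n) :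
    mkL n (wMix P S k (j + 1)) = (mkL n (wMix P S k j)).set j (fW P S (k + 1) j) := by
  rw [mkL_set hj]
  exact mkL_congr (fun p _ => wMix_succ P S k j p)

theorem pMix_self (P S : List Int) (k : Int) (j : Nat) : pMix P S k j j = fP P S k j := by
  simp [pMix]

theorem wMix_self (P S : List Int) (k : Int) (j : Nat) : wMix P S k j j = fW P S k j := by
  simp [wMix]

theorem step_lemma {P S : List Int} {n : Nat}
    (hs : ∀ i, i < n → 1 ≤ S.getD i 0) (k : Nat) {j : Nat} (hj : j < n) :
    stepA S (k : Int) (mkL n (pMix P S (k : Int) j), mkL n (wMix P S (k : Int) j)) j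
      = (mkL n (pMix P S (k : Int) (j + 1)), mkL n (wMix P S (k : Int) (j + 1))) := by
  have hgP : (mkL n (pMix P S (k : Int) j)).getD j 0 = fP P S (k : Int) j := by
    rw [mkL_getD hj, pMix_self]
  have hgW : (mkL n (wMix P S (k : Int) j)).getD j 0 = fW P S (k : Int) j := by
    rw [mkL_getD hj, wMix_self]
  have hce := cR_le_eR P S j
  -- the three branch results, shared by the j = 0 and j = i+1 cases
  have hset : cR P S j ≤ (k : Int) → fW P S (k : Int) j = 0 →
      ((mkL n (pMix P S (k : Int) j)), (mkL n (wMix P S (k : Int) j)).set j (k : Int))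
        = (mkL n (pMix P S (k : Int) (j + 1)), mkL n (wMix P S (k : Int) (j + 1))) := by
    intro hcond hw
    have hk0 := (fW_zero_iff (P := P) (S := S) (j := j) (k : Int)).mp hw
    refine Prod.ext ?_ ?_
    · rw [mkL_pMix_set hj, mkL_set_self hj _ ((fP_frozen hcond).trans (pMix_self P S _ j).symm)]
    · rw [mkL_wMix_set hj, ← wSet_val (by positivity) hcond hk0]
  have hkeep : cR P S j ≤ (k : Int) → fW P S (k : Int) j ≠ 0 →
      ((mkL n (pMix P S (k : Int) j)), (mkL n (wMix P S (k : Int) j)))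
        = (mkL n (pMix P S (k : Int) (j + 1)), mkL n (wMix P S (k : Int) (j + 1))) := by
    intro hcond hw
    have hk0 : eR P S j < (k : Int) := by
      by_contra hcon
      exact hw ((fW_zero_iff _).mpr (by omega))
    refine Prod.ext ?_ ?_
    · rw [mkL_pMix_set hj, mkL_set_self hj _ ((fP_frozen hcond).trans (pMix_self P S _ j).symm)]
    · rw [mkL_wMix_set hj, mkL_set_self hj _ ((fW_succ_of_ne (by omega)).trans (wMix_self P S _ j).symm)]
  have hadd : (k : Int) < cR P S j →
      ((mkL n (pMix P S (k : Int) j)).set j (fP P S (k : Int) j + S.getD j 0),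
        (mkL n (wMix P S (k : Int) j)))
        = (mkL n (pMix P S (k : Int) (j + 1)), mkL n (wMix P S (k : Int) (j + 1))) := by
    intro hcond
    refine Prod.ext ?_ ?_
    · rw [mkL_pMix_set hj, fP_add hcond]
    · rw [mkL_wMix_set hj, mkL_set_self hj _ ((fW_succ_of_ne (by omega)).trans (wMix_self P S _ j).symm)]
  cases j with
  | zero =>
    have hs0 := hs 0 hj
    simp only [stepA]
    rw [hgP, hgW]
    by_cases hcond : cR P S 0 ≤ (k : Int)
    · rw [if_pos ((cond0_iff hs0 k).mpr hcond)]
      by_cases hw : fW P S (k : Int) 0 = 0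
      · rw [if_pos hw]; exact hset hcond hw
      · rw [if_neg hw]; exact hkeep hcond hw
    · rw [if_neg (fun hcon => hcond ((cond0_iff hs0 k).mp hcon))]
      exact hadd (by omega)
  | succ i =>
    have hin : i < n := by omega
    have hsn := hs (i + 1) hj
    have hgWp : (mkL n (wMix P S (k : Int) (i + 1))).getD ((i + 1) - 1) 0
        = fW P S ((k : Int) + 1) i := by
      simp only [Nat.add_sub_cancel]
      rw [mkL_getD hin]
      simp [wMix]
    have hcR : cR P S (i + 1) = eR P S (i + 1) := by simp [cR]
    simp only [stepA, if_neg (Nat.succ_ne_zero i)]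
    rw [hgP, hgW, hgWp]
    by_cases hcond : cR P S (i + 1) ≤ (k : Int)
    · have hpair := (condS_iff hsn k).mpr (hcR ▸ hcond)
      rw [if_pos ⟨(fW_ne_iff (k : Int)).mpr hpair.1, hpair.2⟩]
      by_cases hw : fW P S (k : Int) (i + 1) = 0
      · rw [if_pos hw]; exact hset hcond hw
      · rw [if_neg hw]; exact hkeep hcond hw
    · have hno : ¬ (fW P S ((k : Int) + 1) i ≠ 0 ∧ 100 ≤ fP P S (k : Int) (i + 1)) := by
        intro hcon
        exact hcond (hcR ▸ (condS_iff hsn k).mp ⟨(fW_ne_iff (k : Int)).mp hcon.1, hcon.2⟩)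
      rw [if_neg hno]
      exact hadd (by omega)

theorem pass_lemma {P S : List Int} {n : Nat}
    (hs : ∀ i, i < n → 1 ≤ S.getD i 0) (k : Nat) :
    (List.range n).foldl (stepA S (k : Int)) (mkL n (fP P S (k : Int)), mkL n (fW P S (k : Int)))
      = (mkL n (fP P S ((k : Int) + 1)), mkL n (fW P S ((k : Int) + 1))) := by
  have key : ∀ j, j ≤ n →
      (List.range j).foldl (stepA S (k : Int))
          (mkL n (pMix P S (k : Int) 0), mkL n (wMix P S (k : Int) 0))
        = (mkL n (pMix P S (k : Int) j), mkL n (wMix P S (k : Int) j)) := by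
    intro j
    induction j with
    | zero => intro _; rfl
    | succ j ih =>
      intro hj
      rw [List.range_succ, List.foldl_append, ih (by omega), List.foldl_cons, List.foldl_nil]
      exact step_lemma hs k (by omega)
  have h0P : mkL n (fP P S (k : Int)) = mkL n (pMix P S (k : Int) 0) :=
    mkL_congr (fun p _ => by simp [pMix])
  have h0W : mkL n (fW P S (k : Int)) = mkL n (wMix P S (k : Int) 0) :=
    mkL_congr (fun p _ => by simp [wMix])
  have hnP : mkL n (pMix P S (k : Int) n) = mkL n (fP P S ((k : Int) + 1)) :=
    mkL_congr (fun p hp => by simp [pMix, hp])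
  have hnW : mkL n (wMix P S (k : Int) n) = mkL n (fW P S ((k : Int) + 1)) :=
    mkL_congr (fun p hp => by simp [wMix, hp])
  rw [h0P, h0W, key n (le_refl n), hnP, hnW]

theorem loopA_succ (speeds : List Int) (n fuel : Nat) (day : Int) (st : List Int × List Int) :
    loopA speeds n (fuel + 1) day st =
      if ((List.range n).foldl (stepA speeds day) st).2.contains 0
      then loopA speeds n fuel (day + 1) ((List.range n).foldl (stepA speeds day) st)
      else ((List.range n).foldl (stepA speeds day) st).2 := rfl

theorem contains_mkL {n : Nat} {f : Nat → Int} :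
    (mkL n f).contains 0 = true ↔ ∃ p, p < n ∧ f p = 0 := by
  simp [mkL, List.mem_map, List.mem_range, eq_comm]

theorem loop_lemma {P S : List Int} {n : Nat}
    (hs : ∀ i, i < n → 1 ≤ S.getD i 0) (hn : 0 < n) :
    ∀ (fuel k : Nat), eR P S (n - 1) + 1 ≤ (k : Int) + fuel →
      loopA S n fuel (k : Int) (mkL n (fP P S (k : Int)), mkL n (fW P S (k : Int)))
        = mkL n (eR P S) := by
  intro fuel
  induction fuel with
  | zero =>
    intro k hk
    simp only [Nat.cast_zero, add_zero] at hk
    show mkL n (fW P S (k : Int)) = mkL n (eR P S)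
    apply mkL_congr
    intro p hp
    have hmono : eR P S p ≤ eR P S (n - 1) := eR_mono P S (by omega)
    unfold fW
    rw [if_pos (by omega)]
  | succ fuel ih =>
    intro k hk
    rw [loopA_succ, pass_lemma hs k]
    by_cases hcont : (mkL n (fW P S ((k : Int) + 1))).contains 0 = true
    · rw [if_pos hcont]
      have hcast : ((k : Int) + 1) = ((k + 1 : Nat) : Int) := by push_cast; ring
      rw [hcast]
      apply ih
      push_cast
      omega
    · rw [if_neg hcont]
      apply mkL_congr
      intro p hp
      have hne : fW P S ((k : Int) + 1) p ≠ 0 := by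
        intro h0
        exact hcont (contains_mkL.mpr ⟨p, hp, h0⟩)
      have := (fW_ne_iff (P := P) (S := S) (j := p) (k : Int)).mp hne
      unfold fW
      rw [if_pos (by omega)]

theorem self_mkL (P : List Int) : P = mkL P.length (fun p => P.getD p 0) := by
  apply List.ext_getElem
  · simp [mkL]
  · intro i h1 h2
    simp [mkL, List.getD_eq_getElem?_getD, List.getElem?_eq_getElem h1]

theorem dce_le_toNat (P : List Int) {S : List Int} {p : Nat} (hs : 1 ≤ S.getD p 0) :
    dce P S p ≤ ((101 - P.getD p 0).toNat : Int) := by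
  set q : Int := ((101 - P.getD p 0).toNat : Int) with hq
  have hq0 : 0 ≤ q := by positivity
  have hq1 : 101 - P.getD p 0 ≤ q := Int.self_le_toNat _
  rw [dce_le_iff hs]
  have : q * 1 ≤ q * S.getD p 0 := mul_le_mul_of_nonneg_left hs hq0
  linarith

theorem elem_le_mapsum {P : List Int} {p : Nat} (hp : p < P.length) (f : Int → Nat) :
    f (P.getD p 0) ≤ (P.map f).sum := by
  apply List.single_le_sum (fun x _ => Nat.zero_le x)
  rw [List.getD_eq_getElem?_getD, List.getElem?_eq_getElem hp]
  simp only [Option.getD_some]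
  exact List.mem_map_of_mem (List.getElem_mem hp)

theorem eR_le_bound (P : List Int) {S : List Int} (hs : ∀ i, i < P.length → 1 ≤ S.getD i 0) :
    ∀ p, p < P.length → eR P S p ≤ 1 + (Nat.cast (R := Int) (P.map (fun x => (101 - x).toNat)).sum) := by
  intro p
  induction p with
  | zero =>
    intro hp
    have h1 := dce_le_toNat P (hs 0 hp)
    have h2 : ((101 - P.getD 0 0).toNat : Int) ≤ (Nat.cast (R := Int) (P.map (fun x => (101 - x).toNat)).sum) := by
      exact_mod_cast elem_le_mapsum hp (fun x => (101 - x).toNat)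
    simp only [eR]
    omega
  | succ p ih =>
    intro hp
    have h0 := ih (by omega)
    have h1 := dce_le_toNat P (hs (p + 1) hp)
    have h2 : ((101 - P.getD (p + 1) 0).toNat : Int)
        ≤ (Nat.cast (R := Int) (P.map (fun x => (101 - x).toNat)).sum) := by
      exact_mod_cast elem_le_mapsum hp (fun x => (101 - x).toNat)
    simp only [eR]
    omega

theorem main_A {P S : List Int}
    (hlen : P.length ≤ S.length) (hs : ∀ i, i < P.length → 1 ≤ S.getD i 0) :
    solution P S = countEndsA (mkL P.length (eR P S)) := by
  unfold solution
  rcases Nat.eq_zero_or_pos P.length with h0 | hn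
  · have hP : P = [] := List.length_eq_zero_iff.mp h0
    subst hP
    rfl
  · have hpair : (P, List.replicate P.length (0 : Int))
        = (mkL P.length (fP P S 0), mkL P.length (fW P S 0)) := by
      rw [Prod.mk.injEq]
      constructor
      · conv_lhs => rw [self_mkL P]
        apply mkL_congr
        intro p hp
        unfold fP
        have := cR_nonneg P S p
        rw [min_eq_left (by omega)]
        ring
      · have hW : mkL P.length (fW P S 0) = mkL P.length (fun _ => (0 : Int)) := by
          apply mkL_congr
          intro p hp
          have := one_le_eR P S p
          unfold fW
          rw [if_neg (by omega)]
        rw [hW]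
        simp [mkL, List.map_const']
    have hb := eR_le_bound P hs (P.length - 1) (by omega)
    have hloop := loop_lemma (P := P) hs hn (2 + (P.map (fun p => (101 - p).toNat)).sum) 0
      (by omega)
    rw [Nat.cast_zero] at hloop
    show countEndsA (loopA S P.length (2 + (List.map (fun p => (101 - p).toNat) P).sum) 0
        (P, List.replicate P.length 0)) = countEndsA (mkL P.length (eR P S))
    rw [hpair, hloop]

theorem main_B {P S : List Int} :
    solution_alt P S = countDaysB (mkL P.length (eR P S)) := by
  have key : ∀ j, (List.range j).foldl
      (fun (st : List Int × Int) i =>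
        let cur := max (max st.2 1)
          (-(PySem.Int.floordiv (P.getD i 0 - 100) (S.getD i 0)))
        (st.1 ++ [cur], cur)) ([], 0)
      = ((List.range j).map (eR P S), if j = 0 then (0 : Int) else eR P S (j - 1)) := by
    intro j
    induction j with
    | zero => rfl
    | succ j ih =>
      rw [List.range_succ, List.foldl_append, ih, List.foldl_cons, List.foldl_nil]
      simp only [List.map_append, List.map_cons, List.map_nil]
      cases j with
      | zero =>
        simp [eR, dce]
      | succ i =>
        have h1 : max (eR P S i) 1 = eR P S i := max_eq_left (one_le_eR P S i)
        simp [eR, dce, h1]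
  unfold solution_alt
  rw [key P.length]
  rfl

-- ===== VERDICT (by name: the statement is the Claim_ definition above) =====
theorem solution_spec : Claim_equal_solution := by
  intro P S _hdom hpre
  unfold Spec_solution
  rw [main_A hpre.1 hpre.2, main_B]
  rfl
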